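-- pv_equiv track=rewrite | github.com/Looqes/LRDC | full_search.py | find_all_difference_expressions
-- ===== SOURCE A (Python) =====
-- def find_all_difference_expressions(possible_differences):
--     difference_expressions = []
--
--     # Repeat finding algorithm with each node (clause difference, a pair of
--     # integers representing the indexes of two clauses between expressions)
--     # as the head node.
--     for i in range(len(possible_differences)):
--         result = find_sub_expressions(possible_differences[i:])
--
--         for new_expression in result:
--             # If found expressions are subsets of already found expressions,
--             # they can be discarded
--             if not any([set(new_expression).issubset(set(expression))
--                         for expression in difference_expressions]):
--                 difference_expressions.append(new_expression)
--
--     return difference_expressions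
--
-- def find_sub_expressions(possible_differences, unavailable=set()):
--     head = possible_differences[0]
--     # When the final node is reached there can be no further nodes reached, so
--     # throw the node immediately
--     if len(possible_differences) == 1:
--         return [{head}]
--     tail = possible_differences[1:]
--
--     # Clauses passed by the previous function calls, or the clauses of the
--     # current head cannot be picked again in a difference expression (every
--     # clause exists only once in an expression!)
--     new_unavailable = unavailable | {head[0], head[1]}
--     result = []
--
--     # Check for each of the remaining tuples if they can be added to the
--     # current diff expression
--     for i, option in enumerate(tail):
--         # If match (no overlap)
--         if option[0] not in new_unavailable and option[1] not in new_unavailable: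
--             # Recursively check for tuples further down the line to be added to
--             # current difference expression
--             subsets = find_sub_expressions(tail[i:], new_unavailable)
--
--             # If any are found, add each of them to result to be passed up
--             if subsets:
--                 for item in subsets:
--                     result.append({head} | item)
--
--     # If no matches are found, return head otherwise return all intermediate
--     # difference expression results
--     if not result:
--         return [{head}]
--     else:
--         return result
-- ===== SOURCE B (Python) =====
-- def find_all_difference_expressions(possible_differences):
--     # Explicit worklist DFS instead of recursion over list slices: frames are
--     # (next index, accumulated expression, used clause indices); children are
--     # pushed in reverse so leaves are emitted in the recursive DFS order.
--     difference_expressions = []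
--     n = len(possible_differences)
--     for start in range(n):
--         head = possible_differences[start]
--         stack = [(start + 1, {head}, {head[0], head[1]})]
--         while stack:
--             nxt, chosen, used = stack.pop()
--             children = []
--             for j in range(nxt, n):
--                 a, b = possible_differences[j]
--                 if a not in used and b not in used:
--                     children.append((j + 1, chosen | {(a, b)}, used | {a, b}))
--             if children:
--                 stack.extend(reversed(children))
--             else:
--                 if not any(chosen <= expression
--                            for expression in difference_expressions):
--                     difference_expressions.append(chosen)
--     return difference_expressions
-- ===== Notes on version B (the rewrite author's own statement) =====
-- stated objective: alternative
-- what changed: The recursive enumeration over list slices (find_sub_expressions) is replaced by an explicit worklist DFS: a stack of (next-index, accumulated expression, used-clauses) frames per starting index, pushing children in reverse so maximal sets are emitted in the original recursive DFS order; the order-sensitive subset filter is applied at emission time.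
import Mathlib
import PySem

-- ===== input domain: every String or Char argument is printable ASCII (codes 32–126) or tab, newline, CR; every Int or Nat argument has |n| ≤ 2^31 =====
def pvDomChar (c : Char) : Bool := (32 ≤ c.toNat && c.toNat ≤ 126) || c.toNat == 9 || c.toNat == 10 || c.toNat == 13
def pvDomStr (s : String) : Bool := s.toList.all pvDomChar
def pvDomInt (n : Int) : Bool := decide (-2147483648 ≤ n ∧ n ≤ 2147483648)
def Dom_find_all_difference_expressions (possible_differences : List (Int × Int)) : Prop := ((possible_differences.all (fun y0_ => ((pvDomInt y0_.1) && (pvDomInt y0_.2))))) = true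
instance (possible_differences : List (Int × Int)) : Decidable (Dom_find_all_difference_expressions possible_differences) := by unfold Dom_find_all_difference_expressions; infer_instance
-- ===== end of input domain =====

-- B replaces A's recursion over list slices by an explicit worklist (stack) DFS over
-- (next-index, accumulated set, used-clauses) frames; objective: alternative decomposition.

-- ===== PORT A =====
-- find_sub_expressions: recursion structurally on a fuel counter; the top-level call
-- passes fuel = length of the full list, which always exceeds the recursion depth
-- (each recursive call receives a strictly shorter list), so the fuel-0 branch is
-- never reached on A's actual calls.
def find_sub_expressionsA : Nat → List (Int × Int) → PySem.Set Int → List (PySem.Set (Int × Int))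
  | 0, _, _ => []
  | _ + 1, [], _ => []      -- unreachable: A only ever calls this on a nonempty list
  | fuel + 1, head :: tail, unavailable =>
    -- "if len(possible_differences) == 1": the list is head :: tail, so len == 1 ↔ tail = []
    if tail.isEmpty then [PySem.Set.ofList [head]]
    else
      let new_unavailable : PySem.Set Int :=
        PySem.Set.add (PySem.Set.add unavailable head.1) head.2
      let result := (PySem.List.enumerate tail).foldl (fun result iopt =>
        if !(PySem.Set.contains new_unavailable iopt.2.1)
            && !(PySem.Set.contains new_unavailable iopt.2.2) then
          let subsets := find_sub_expressionsA fuel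
            (PySem.List.slice tail (some iopt.1) none) new_unavailable
          if subsets.isEmpty then result
          else result ++ subsets.map (fun item =>
            PySem.Set.union (PySem.Set.ofList [head]) item)
        else result) []
      if result.isEmpty then [PySem.Set.ofList [head]] else result

def find_all_difference_expressions (possible_differences : List (Int × Int)) : List (List (Int × Int)) :=
  (PySem.List.pyRange 0 possible_differences.length 1).foldl (fun difference_expressions i =>
    let result := find_sub_expressionsA possible_differences.length
      (PySem.List.slice possible_differences (some i) none) PySem.Set.empty
    result.foldl (fun difference_expressions new_expression =>
      if !(difference_expressions.any (fun expression =>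
            PySem.Set.issubset (PySem.Set.ofList new_expression) (PySem.Set.ofList expression))) then
        difference_expressions ++ [new_expression]
      else difference_expressions) difference_expressions) []

-- ===== PORT B =====
-- The inner "for j in range(nxt, n)" building the children list; indices are the
-- Nat loop counters of Source B's ranges (always in bounds, so pd[j] is pd.getD j _).
def pvChildrenB (pd : List (Int × Int)) (n nxt : Nat)
    (chosen : PySem.Set (Int × Int)) (used : PySem.Set Int) :
    List (Nat × PySem.Set (Int × Int) × PySem.Set Int) :=
  (List.range' nxt (n - nxt)).foldl (fun children j =>
    -- "a, b = possible_differences[j]" inlined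
    if !(PySem.Set.contains used (pd.getD j (0, 0)).1)
        && !(PySem.Set.contains used (pd.getD j (0, 0)).2) then
      children ++ [(j + 1,
        PySem.Set.union chosen (PySem.Set.ofList [pd.getD j (0, 0)]),
        PySem.Set.union used (PySem.Set.ofList [(pd.getD j (0, 0)).1, (pd.getD j (0, 0)).2]))]
    else children) []

-- The "while stack" loop, structurally on a fuel counter; the stack is kept top-first,
-- so "stack.extend(reversed(children)); stack.pop()" is "children ++ rest".  The
-- top-level call passes fuel = 2^n, which always exceeds the number of pops (proved
-- via pvCost below), so the fuel-0 branch is never reached on B's actual calls.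
def pvRunB (pd : List (Int × Int)) (n : Nat) :
    Nat → List (List (Int × Int)) → List (Nat × PySem.Set (Int × Int) × PySem.Set Int) →
    List (List (Int × Int))
  | 0, exprs, _ => exprs
  | _ + 1, exprs, [] => exprs
  | fuel + 1, exprs, (nxt, chosen, used) :: rest =>
    let children := pvChildrenB pd n nxt chosen used
    if children.isEmpty then
      pvRunB pd n fuel
        (if exprs.any (fun expression => PySem.Set.issubset chosen expression) then exprs
         else exprs ++ [chosen]) rest
    else pvRunB pd n fuel exprs (children ++ rest)

def find_all_difference_expressions_alt (possible_differences : List (Int × Int)) : List (List (Int × Int)) :=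
  let n := possible_differences.length
  (List.range n).foldl (fun difference_expressions start =>
    let head := possible_differences.getD start (0, 0)
    pvRunB possible_differences n (2 ^ n) difference_expressions
      [(start + 1, PySem.Set.ofList [head], PySem.Set.ofList [head.1, head.2])]) []

-- ===== PRECONDITION & SPEC =====
def Spec_find_all_difference_expressions (possible_differences : List (Int × Int)) (out : List (List (Int × Int))) : Prop := out = find_all_difference_expressions_alt possible_differences
instance (possible_differences : List (Int × Int)) (out : List (List (Int × Int))) : Decidable (Spec_find_all_difference_expressions possible_differences out) := by unfold Spec_find_all_difference_expressions; infer_instance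

-- ===== CLAIM (what is proved, stated in full; the proofs are below) =====
def Claim_equal_find_all_difference_expressions : Prop := ∀ (possible_differences : List (Int × Int)), Dom_find_all_difference_expressions possible_differences → Spec_find_all_difference_expressions possible_differences (find_all_difference_expressions possible_differences)

-- ===== LEMMAS AND PROOFS =====

-- Shared descriptions of what both programs compute, used only by the proofs.

-- pair j of pd does not clash with the used-coordinates set
def pvOk (pd : List (Int × Int)) (used : PySem.Set Int) (j : Nat) : Bool :=
  !(PySem.Set.contains used (pd.getD j (0, 0)).1)
    && !(PySem.Set.contains used (pd.getD j (0, 0)).2)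

def pvOpts (pd : List (Int × Int)) (i : Nat) (used : PySem.Set Int) : List Nat :=
  (List.range' i (pd.length - i)).filter (pvOk pd used)

def pvUsed' (pd : List (Int × Int)) (used : PySem.Set Int) (j : Nat) : PySem.Set Int :=
  PySem.Set.add (PySem.Set.add used (pd.getD j (0, 0)).1) (pd.getD j (0, 0)).2

-- all maximal non-overlapping extension chains from index i, in DFS order
def pvExt (pd : List (Int × Int)) : Nat → Nat → PySem.Set Int → List (List (Int × Int))
  | 0, _, _ => [[]]
  | fuel + 1, i, used =>
    let opts := pvOpts pd i used
    if opts.isEmpty then [[]]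
    else opts.flatMap (fun j =>
      (pvExt pd fuel (j + 1) (pvUsed' pd used j)).map (fun c => pd.getD j (0, 0) :: c))

-- number of stack pops the machine spends on one frame
def pvCost (pd : List (Int × Int)) : Nat → Nat → PySem.Set Int → Nat
  | 0, _, _ => 1
  | fuel + 1, i, used =>
    1 + ((pvOpts pd i used).map (fun j => pvCost pd fuel (j + 1) (pvUsed' pd used j))).sum

def pvLeaves (pd : List (Int × Int)) (fr : Nat × PySem.Set (Int × Int) × PySem.Set Int) :
    List (List (Int × Int)) :=
  (pvExt pd pd.length fr.1 fr.2.2).map (fun c => fr.2.1 ++ c)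

def pvEmitA (exprs : List (List (Int × Int))) (ne : List (Int × Int)) : List (List (Int × Int)) :=
  if !(exprs.any (fun expression =>
        PySem.Set.issubset (PySem.Set.ofList ne) (PySem.Set.ofList expression))) then
    exprs ++ [ne]
  else exprs

def pvEmitB (exprs : List (List (Int × Int))) (chosen : List (Int × Int)) : List (List (Int × Int)) :=
  if exprs.any (fun expression => PySem.Set.issubset chosen expression) then exprs
  else exprs ++ [chosen]

def pvInv (fr : Nat × PySem.Set (Int × Int) × PySem.Set Int) : Prop :=
  ∀ p ∈ fr.2.1, p.1 ∈ fr.2.2 ∧ p.2 ∈ fr.2.2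

lemma pvOpts_empty_of_ge (pd : List (Int × Int)) (i : Nat) (used : PySem.Set Int)
    (h : pd.length ≤ i) : pvOpts pd i used = [] := by
  simp [pvOpts, Nat.sub_eq_zero_of_le h]

lemma pvOpts_mem {pd : List (Int × Int)} {i : Nat} {used : PySem.Set Int} {j : Nat}
    (h : j ∈ pvOpts pd i used) : i ≤ j ∧ j < pd.length ∧ pvOk pd used j = true := by
  obtain ⟨hr, hok⟩ := List.mem_filter.mp h
  obtain ⟨h1, h2⟩ := List.mem_range'_1.mp hr
  exact ⟨h1, by omega, hok⟩

lemma pvContains_false {s : PySem.Set Int} {x : Int} :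
    PySem.Set.contains s x = false ↔ x ∉ s := by
  rw [Bool.eq_false_iff]
  exact not_congr (PySem.Set.contains_iff s x)

lemma pvOk_iff {pd : List (Int × Int)} {used : PySem.Set Int} {j : Nat} :
    pvOk pd used j = true ↔
      (pd.getD j (0, 0)).1 ∉ used ∧ (pd.getD j (0, 0)).2 ∉ used := by
  unfold pvOk
  rw [Bool.and_eq_true, Bool.not_eq_true', Bool.not_eq_true', pvContains_false, pvContains_false]

lemma mem_pvUsed' {pd : List (Int × Int)} {used : PySem.Set Int} {j : Nat} {x : Int} :
    x ∈ pvUsed' pd used j ↔ x ∈ used ∨ x = (pd.getD j (0, 0)).1 ∨ x = (pd.getD j (0, 0)).2 := by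
  simp [pvUsed', PySem.Set.mem_add, or_assoc]

lemma pvExt_congr (pd : List (Int × Int)) (f g i : Nat) (used : PySem.Set Int)
    (hf : pd.length - i ≤ f) (hg : pd.length - i ≤ g) :
    pvExt pd f i used = pvExt pd g i used := by
  induction f generalizing g i used with
  | zero =>
    cases g with
    | zero => rfl
    | succ g => simp [pvExt, pvOpts_empty_of_ge pd i used (by omega)]
  | succ f ih =>
    cases g with
    | zero => simp [pvExt, pvOpts_empty_of_ge pd i used (by omega)]
    | succ g =>
      simp only [pvExt]
      cases hop : (pvOpts pd i used).isEmpty with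
      | true => simp
      | false =>
        simp only [Bool.false_eq_true, if_false]
        refine List.flatMap_congr (fun j hj => ?_)
        obtain ⟨h1, h2, _⟩ := pvOpts_mem hj
        exact congrArg _ (ih g (j + 1) _ (by omega) (by omega))

lemma pvCost_congr (pd : List (Int × Int)) (f g i : Nat) (used : PySem.Set Int)
    (hf : pd.length - i ≤ f) (hg : pd.length - i ≤ g) :
    pvCost pd f i used = pvCost pd g i used := by
  induction f generalizing g i used with
  | zero =>
    cases g with
    | zero => rfl
    | succ g => simp [pvCost, pvOpts_empty_of_ge pd i used (by omega)]
  | succ f ih =>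
    cases g with
    | zero => simp [pvCost, pvOpts_empty_of_ge pd i used (by omega)]
    | succ g =>
      simp only [pvCost]
      refine congrArg (fun s => 1 + s) (congrArg List.sum (List.map_congr_left (fun j hj => ?_)))
      obtain ⟨h1, h2, _⟩ := pvOpts_mem hj
      exact ih g (j + 1) _ (by omega) (by omega)

lemma pvExt_ne_nil (pd : List (Int × Int)) (f i : Nat) (used : PySem.Set Int) :
    pvExt pd f i used ≠ [] := by
  induction f generalizing i used with
  | zero => simp [pvExt]
  | succ f ih =>
    simp only [pvExt]
    split
    · simp
    · next hop =>
      rw [Bool.not_eq_true, List.isEmpty_eq_false_iff] at hop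
      intro h
      rw [List.flatMap_eq_nil_iff] at h
      obtain ⟨j, hj⟩ := List.exists_mem_of_ne_nil _ hop
      have := h _ hj
      rw [List.map_eq_nil_iff] at this
      exact ih _ _ this

lemma pvExt_mem (pd : List (Int × Int)) (f i : Nat) (used : PySem.Set Int)
    (c : List (Int × Int)) (hc : c ∈ pvExt pd f i used) :
    c.Nodup ∧ ∀ p ∈ c, p.1 ∉ used ∧ p.2 ∉ used := by
  induction f generalizing i used c with
  | zero => simp [pvExt] at hc; simp [hc]
  | succ f ih =>
    simp only [pvExt] at hc
    split at hc
    · simp at hc; simp [hc]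
    · rw [List.mem_flatMap] at hc
      obtain ⟨j, hj, hcm⟩ := hc
      rw [List.mem_map] at hcm
      obtain ⟨c', hc', rfl⟩ := hcm
      obtain ⟨_, _, hok⟩ := pvOpts_mem hj
      obtain ⟨ha, hb⟩ := pvOk_iff.mp hok
      obtain ⟨hnd, hco⟩ := ih _ _ _ hc'
      have hsub : ∀ p ∈ c', p.1 ∉ used ∧ p.2 ∉ used := by
        intro p hp
        obtain ⟨h1, h2⟩ := hco p hp
        rw [mem_pvUsed'] at h1 h2
        exact ⟨fun h => h1 (Or.inl h), fun h => h2 (Or.inl h)⟩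
      refine ⟨List.nodup_cons.mpr ⟨fun hmem => ?_, hnd⟩, ?_⟩
      · obtain ⟨h1, _⟩ := hco _ hmem
        exact h1 (mem_pvUsed'.mpr (Or.inr (Or.inl rfl)))
      · intro p hp
        rcases List.mem_cons.mp hp with rfl | hp'
        · exact ⟨ha, hb⟩
        · exact hsub p hp'

lemma pvGeoSum (n : Nat) : ∀ (m i : Nat), i + m = n →
    ((List.range' i m).map (fun j => 2 ^ (n - (j + 1)))).sum = 2 ^ m - 1 := by
  intro m
  induction m with
  | zero => simp
  | succ m ih =>
    intro i h
    rw [List.range'_succ, List.map_cons, List.sum_cons, ih (i + 1) (by omega)]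
    have h1 : n - (i + 1) = m := by omega
    have h2 : (1:Nat) ≤ 2 ^ m := Nat.one_le_two_pow
    rw [h1, pow_succ]
    omega

lemma pvCost_pos (pd : List (Int × Int)) (f i : Nat) (used : PySem.Set Int) :
    1 ≤ pvCost pd f i used := by
  cases f <;> simp [pvCost]

lemma pvCost_le (pd : List (Int × Int)) (f i : Nat) (used : PySem.Set Int)
    (hf : pd.length - i ≤ f) : pvCost pd f i used ≤ 2 ^ (pd.length - i) := by
  induction f generalizing i used with
  | zero => simpa [pvCost] using Nat.one_le_two_pow
  | succ f ih =>
    simp only [pvCost]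
    have hsum1 : ((pvOpts pd i used).map (fun j => pvCost pd f (j + 1) (pvUsed' pd used j))).sum ≤
        ((pvOpts pd i used).map (fun j => 2 ^ (pd.length - (j + 1)))).sum := by
      refine List.sum_le_sum (fun j hj => ?_)
      obtain ⟨h1, h2, _⟩ := pvOpts_mem hj
      exact ih _ _ (by omega)
    have hsub : ((pvOpts pd i used).map (fun j => 2 ^ (pd.length - (j + 1)))).sum ≤
        ((List.range' i (pd.length - i)).map (fun j => 2 ^ (pd.length - (j + 1)))).sum := by
      refine List.Sublist.sum_le_sum ?_ (fun a _ => Nat.zero_le a)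
      exact List.Sublist.map _ List.filter_sublist
    by_cases hni : pd.length ≤ i
    · have h0 := pvOpts_empty_of_ge pd i used hni
      simp [h0, Nat.one_le_two_pow]
    · have hgeo := pvGeoSum pd.length (pd.length - i) i (by omega)
      have h2 : (1:Nat) ≤ 2 ^ (pd.length - i) := Nat.one_le_two_pow
      omega

lemma pvExt_of_opts_empty (pd : List (Int × Int)) (f i : Nat) (used : PySem.Set Int)
    (h : pvOpts pd i used = []) : pvExt pd f i used = [[]] := by
  cases f <;> simp [pvExt, h]

lemma pvUnion_single (s : PySem.Set (Int × Int)) (x : Int × Int) :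
    PySem.Set.union s (PySem.Set.ofList [x]) = PySem.Set.add s x := rfl

lemma pvUnion_pair (s : PySem.Set Int) (a b : Int) :
    PySem.Set.union s (PySem.Set.ofList [a, b]) = PySem.Set.add (PySem.Set.add s a) b := by
  by_cases hab : b = a
  · subst hab
    have h1 : PySem.Set.ofList [b, b] = [b] := by
      show PySem.Set.add (PySem.Set.add [] b) b = [b]
      rw [PySem.Set.add_of_mem ((PySem.Set.mem_add _ _ _).mpr (Or.inr rfl))]
      rfl
    rw [h1]
    show PySem.Set.add s b = PySem.Set.add (PySem.Set.add s b) b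
    exact (PySem.Set.add_of_mem ((PySem.Set.mem_add _ _ _).mpr (Or.inr rfl))).symm
  · have hab' : a ≠ b := fun h => hab h.symm
    have h1 : PySem.Set.ofList [a, b] = [a, b] :=
      PySem.Set.ofList_eq_self_of_nodup _ (by simp [hab'])
    rw [h1]
    rfl

lemma pvInv_child (pd : List (Int × Int)) (nxt : Nat) (chosen : PySem.Set (Int × Int))
    (used : PySem.Set Int) (j : Nat) (hinv : pvInv (nxt, chosen, used)) :
    pvInv (j + 1, chosen ++ [pd.getD j (0, 0)], pvUsed' pd used j) := by
  intro p hp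
  rcases List.mem_append.mp hp with h | h
  · obtain ⟨h1, h2⟩ := hinv p h
    exact ⟨mem_pvUsed'.mpr (Or.inl h1), mem_pvUsed'.mpr (Or.inl h2)⟩
  · simp only [List.mem_singleton] at h
    subst h
    exact ⟨mem_pvUsed'.mpr (Or.inr (Or.inl rfl)), mem_pvUsed'.mpr (Or.inr (Or.inr rfl))⟩

lemma pvChildren_eq (pd : List (Int × Int)) (nxt : Nat) (chosen : PySem.Set (Int × Int))
    (used : PySem.Set Int) (hinv : pvInv (nxt, chosen, used)) :
    pvChildrenB pd pd.length nxt chosen used =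
      (pvOpts pd nxt used).map (fun j =>
        (j + 1, chosen ++ [pd.getD j (0, 0)], pvUsed' pd used j)) := by
  unfold pvChildrenB
  rw [PySem.List.foldl_append_if
    (fun j => !(PySem.Set.contains used (pd.getD j (0, 0)).1)
        && !(PySem.Set.contains used (pd.getD j (0, 0)).2))
    (fun j => (j + 1,
      PySem.Set.union chosen (PySem.Set.ofList [pd.getD j (0, 0)]),
      PySem.Set.union used (PySem.Set.ofList [(pd.getD j (0, 0)).1, (pd.getD j (0, 0)).2])))
    (List.range' nxt (pd.length - nxt)) []]
  rw [List.nil_append]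
  have hopts : List.filter (fun j => !(PySem.Set.contains used (pd.getD j (0, 0)).1)
      && !(PySem.Set.contains used (pd.getD j (0, 0)).2)) (List.range' nxt (pd.length - nxt)) =
      pvOpts pd nxt used := rfl
  rw [hopts]
  refine List.map_congr_left (fun j hj => ?_)
  have hok : pvOk pd used j = true := (List.mem_filter.mp hj).2
  obtain ⟨ha, hb⟩ := pvOk_iff.mp hok
  have hnm : pd.getD j (0, 0) ∉ chosen := fun hmem => ha (hinv _ hmem).1
  rw [pvUnion_single, PySem.Set.add_of_not_mem hnm, pvUnion_pair]
  rfl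

lemma pvLeaves_fr (pd : List (Int × Int)) (nxt : Nat) (chosen : PySem.Set (Int × Int))
    (used : PySem.Set Int) (hop : pvOpts pd nxt used ≠ []) :
    ((pvOpts pd nxt used).map (fun j =>
        (j + 1, chosen ++ [pd.getD j (0, 0)], pvUsed' pd used j))).flatMap (pvLeaves pd) =
      pvLeaves pd (nxt, chosen, used) := by
  have hlen : 1 ≤ pd.length := by
    obtain ⟨j, hj⟩ := List.exists_mem_of_ne_nil _ hop
    have := (pvOpts_mem hj).2.1
    omega
  obtain ⟨m, hm⟩ : ∃ m, pd.length = m + 1 := ⟨pd.length - 1, by omega⟩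
  conv_rhs => rw [pvLeaves, hm]
  simp only [pvExt]
  rw [if_neg (by simp [List.isEmpty_iff, hop])]
  rw [List.flatMap_map, List.map_flatMap]
  refine List.flatMap_congr (fun j hj => ?_)
  obtain ⟨h1, h2, _⟩ := pvOpts_mem hj
  simp only [pvLeaves]
  rw [List.map_map]
  rw [pvExt_congr pd pd.length m (j + 1) _ (by omega) (by omega)]
  refine List.map_congr_left (fun c _ => ?_)
  simp

lemma pvCost_children (pd : List (Int × Int)) (nxt : Nat) (used : PySem.Set Int)
    (hop : pvOpts pd nxt used ≠ []) :
    1 + ((pvOpts pd nxt used).map (fun j =>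
        pvCost pd pd.length (j + 1) (pvUsed' pd used j))).sum =
      pvCost pd pd.length nxt used := by
  have hlen : 1 ≤ pd.length := by
    obtain ⟨j, hj⟩ := List.exists_mem_of_ne_nil _ hop
    have := (pvOpts_mem hj).2.1
    omega
  obtain ⟨m, hm⟩ : ∃ m, pd.length = m + 1 := ⟨pd.length - 1, by omega⟩
  conv_rhs => rw [hm]
  simp only [pvCost]
  refine congrArg (fun s => 1 + s) (congrArg List.sum (List.map_congr_left (fun j hj => ?_)))
  obtain ⟨h1, h2, _⟩ := pvOpts_mem hj
  exact pvCost_congr pd pd.length m (j + 1) _ (by omega) (by omega)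

lemma pvRunB_eq (pd : List (Int × Int)) (f : Nat)
    (stack : List (Nat × PySem.Set (Int × Int) × PySem.Set Int))
    (exprs : List (List (Int × Int)))
    (hinv : ∀ fr ∈ stack, pvInv fr)
    (hf : (stack.map (fun fr => pvCost pd pd.length fr.1 fr.2.2)).sum ≤ f) :
    pvRunB pd pd.length f exprs stack =
      (stack.flatMap (pvLeaves pd)).foldl pvEmitB exprs := by
  induction f generalizing stack exprs with
  | zero =>
    cases stack with
    | nil => simp [pvRunB]
    | cons fr rest =>
      exfalso
      have h1 := pvCost_pos pd pd.length fr.1 fr.2.2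
      rw [List.map_cons, List.sum_cons] at hf
      omega
  | succ f ih =>
    cases stack with
    | nil => simp [pvRunB]
    | cons fr rest =>
      obtain ⟨nxt, chosen, used⟩ := fr
      have hinvfr : pvInv (nxt, chosen, used) := hinv _ (by simp)
      have hinvrest : ∀ gr ∈ rest, pvInv gr := fun gr h => hinv gr (List.mem_cons_of_mem _ h)
      rw [List.map_cons, List.sum_cons] at hf
      have hfr : pvCost pd pd.length (nxt, chosen, used).1 (nxt, chosen, used).2.2 =
          pvCost pd pd.length nxt used := rfl
      rw [hfr] at hf
      have hcost1 := pvCost_pos pd pd.length nxt used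
      simp only [pvRunB]
      rw [pvChildren_eq pd nxt chosen used hinvfr]
      by_cases hop : pvOpts pd nxt used = []
      · rw [hop]
        simp only [List.map_nil, List.isEmpty_nil, if_true]
        have hemit : (if exprs.any (fun expression => PySem.Set.issubset chosen expression)
            then exprs else exprs ++ [chosen]) = pvEmitB exprs chosen := rfl
        rw [hemit, ih rest _ hinvrest (by omega)]
        have hlv : pvLeaves pd (nxt, chosen, used) = [chosen] := by
          simp [pvLeaves, pvExt_of_opts_empty pd _ _ _ hop]
        rw [List.flatMap_cons, hlv, List.singleton_append, List.foldl_cons]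
      · rw [if_neg (by simp [List.isEmpty_iff, hop])]
        have hinvch : ∀ gr ∈ ((pvOpts pd nxt used).map (fun j =>
            (j + 1, chosen ++ [pd.getD j (0, 0)], pvUsed' pd used j))) ++ rest, pvInv gr := by
          intro gr hgr
          rcases List.mem_append.mp hgr with h | h
          · obtain ⟨j, hj, rfl⟩ := List.mem_map.mp h
            exact pvInv_child pd nxt chosen used j hinvfr
          · exact hinvrest gr h
        have hsum : ((((pvOpts pd nxt used).map (fun j =>
              (j + 1, chosen ++ [pd.getD j (0, 0)], pvUsed' pd used j))) ++ rest).map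
              (fun fr : Nat × PySem.Set (Int × Int) × PySem.Set Int => pvCost pd pd.length fr.1 fr.2.2)).sum ≤ f := by
          rw [List.map_append, List.sum_append, List.map_map]
          have hch := pvCost_children pd nxt used hop
          have hmm : ((pvOpts pd nxt used).map ((fun fr : Nat × PySem.Set (Int × Int) × PySem.Set Int => pvCost pd pd.length fr.1 fr.2.2) ∘
              (fun j => (j + 1, chosen ++ [pd.getD j (0, 0)], pvUsed' pd used j)))).sum =
              ((pvOpts pd nxt used).map (fun j => pvCost pd pd.length (j + 1) (pvUsed' pd used j))).sum := rfl
          rw [hmm]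
          omega
        rw [ih _ _ hinvch hsum]
        rw [List.flatMap_append, List.flatMap_cons, pvLeaves_fr pd nxt chosen used hop]

lemma pvGetD_drop (pd : List (Int × Int)) (m i : Nat) :
    (pd.drop m).getD i (0, 0) = pd.getD (m + i) (0, 0) := by
  simp [List.getD_eq_getElem?_getD, List.getElem?_drop]

lemma pvOfListSingle (x : Int × Int) : PySem.Set.ofList [x] = [x] :=
  PySem.Set.ofList_eq_self_of_nodup _ (by simp)

lemma pvFlatMapIf {α β : Type} (l : List α) (p : α → Bool) (g : α → List β) :
    (l.flatMap fun x => if p x then g x else []) = (l.filter p).flatMap g := by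
  induction l with
  | nil => rfl
  | cons a l ih => by_cases h : p a <;> simp [h, ih]

lemma pvSub_ne_nil (f : Nat) (xs : List (Int × Int)) (unav : PySem.Set Int)
    (hf : 0 < f) (hxs : xs ≠ []) : find_sub_expressionsA f xs unav ≠ [] := by
  obtain ⟨f', rfl⟩ : ∃ f', f = f' + 1 := ⟨f - 1, by omega⟩
  obtain ⟨h, t, rfl⟩ := List.exists_cons_of_ne_nil hxs
  simp only [find_sub_expressionsA]
  split_ifs with h1 h2
  · simp
  · simp
  · intro hh
    rw [hh] at h2
    exact h2 rfl

lemma pvLoop (tail : List (Int × Int)) (nu : PySem.Set Int) (f : Nat) (head : Int × Int)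
    (hfpos : 0 < f) :
    (PySem.List.enumerate tail).foldl (fun result iopt =>
      if !(PySem.Set.contains nu iopt.2.1) && !(PySem.Set.contains nu iopt.2.2) then
        if (find_sub_expressionsA f (PySem.List.slice tail (some iopt.1) none) nu).isEmpty then result
        else result ++ (find_sub_expressionsA f (PySem.List.slice tail (some iopt.1) none) nu).map
          (fun item => PySem.Set.union (PySem.Set.ofList [head]) item)
      else result) [] =
    ((List.range tail.length).filter (fun kk =>
        !(PySem.Set.contains nu (tail.getD kk (0, 0)).1)
          && !(PySem.Set.contains nu (tail.getD kk (0, 0)).2))).flatMap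
      (fun kk => (find_sub_expressionsA f (tail.drop kk) nu).map
        (fun item => PySem.Set.union (PySem.Set.ofList [head]) item)) := by
  have hpt : ∀ (acc : List (PySem.Set (Int × Int))), ∀ iopt ∈ PySem.List.enumerate tail,
      (if !(PySem.Set.contains nu iopt.2.1) && !(PySem.Set.contains nu iopt.2.2) then
        if (find_sub_expressionsA f (PySem.List.slice tail (some iopt.1) none) nu).isEmpty then acc
        else acc ++ (find_sub_expressionsA f (PySem.List.slice tail (some iopt.1) none) nu).map
          (fun item => PySem.Set.union (PySem.Set.ofList [head]) item)
      else acc) =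
      acc ++ (if !(PySem.Set.contains nu iopt.2.1) && !(PySem.Set.contains nu iopt.2.2) then
        (find_sub_expressionsA f (PySem.List.slice tail (some iopt.1) none) nu).map
          (fun item => PySem.Set.union (PySem.Set.ofList [head]) item)
      else []) := by
    intro acc iopt hm
    rw [PySem.List.mem_enumerate_iff] at hm
    obtain ⟨kk, hkk, he⟩ := hm
    by_cases hc : (!(PySem.Set.contains nu iopt.2.1) && !(PySem.Set.contains nu iopt.2.2)) = true
    · rw [if_pos hc, if_pos hc]
      have h1 : iopt.1 = (kk : Int) := by rw [he]; simp
      rw [h1]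
      have hsl : PySem.List.slice tail (some ((kk : Nat) : Int)) none = tail.drop kk := by
        rw [PySem.List.slice_from tail (by simp)]
        simp
      rw [hsl]
      have hne : find_sub_expressionsA f (tail.drop kk) nu ≠ [] := by
        refine pvSub_ne_nil f _ nu hfpos ?_
        intro hdn
        rw [List.drop_eq_nil_iff] at hdn
        omega
      rw [if_neg (by simpa [List.isEmpty_iff] using hne)]
    · rw [if_neg hc, if_neg hc, List.append_nil]
  rw [PySem.List.foldl_congr_mem _ _ _ _ hpt]
  rw [PySem.List.foldl_append_eq_flatMap, List.nil_append]
  rw [PySem.List.enumerate_eq_map_pyRange tail (0, 0)]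
  rw [show PySem.List.len tail = (tail.length : Int) from rfl]
  rw [PySem.List.pyRange_zero_natCast, List.map_map]
  rw [List.flatMap_map]
  have hmid : ∀ kk ∈ List.range tail.length,
      (fun iopt : Int × (Int × Int) =>
        (if !(PySem.Set.contains nu iopt.2.1) && !(PySem.Set.contains nu iopt.2.2) then
          (find_sub_expressionsA f (PySem.List.slice tail (some iopt.1) none) nu).map
            (fun item => PySem.Set.union (PySem.Set.ofList [head]) item)
        else []))
        (((fun j => (j, PySem.List.pyGetD tail j (0, 0))) ∘ fun k : Nat => (k : Int)) kk) =
      (if !(PySem.Set.contains nu (tail.getD kk (0, 0)).1)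
          && !(PySem.Set.contains nu (tail.getD kk (0, 0)).2) then
        (find_sub_expressionsA f (tail.drop kk) nu).map
          (fun item => PySem.Set.union (PySem.Set.ofList [head]) item)
      else []) := by
    intro kk _
    simp only [Function.comp]
    have hsl : PySem.List.slice tail (some ((kk : Nat) : Int)) none = tail.drop kk := by
      rw [PySem.List.slice_from tail (by simp)]
      simp
    rw [PySem.List.pyGetD_natCast, hsl]
  rw [List.flatMap_congr hmid, pvFlatMapIf]

lemma pvHeadMemNu (unav : PySem.Set Int) (a b : Int) :
    a ∈ PySem.Set.add (PySem.Set.add unav a) b := by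
  exact (PySem.Set.mem_add _ _ _).mpr (Or.inl ((PySem.Set.mem_add _ _ _).mpr (Or.inr rfl)))

lemma pvSubA_eq (pd : List (Int × Int)) (f k : Nat) (unav : PySem.Set Int)
    (hk : k < pd.length) (hf : pd.length - k ≤ f) :
    find_sub_expressionsA f (pd.drop k) unav =
      (pvExt pd f (k + 1) (pvUsed' pd unav k)).map (fun c => pd.getD k (0, 0) :: c) := by
  induction f generalizing k unav with
  | zero => omega
  | succ f ih =>
    have hdrop : pd.drop k = pd.getD k (0, 0) :: pd.drop (k + 1) := by
      rw [List.getD_eq_getElem pd (0, 0) hk]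
      exact List.drop_eq_getElem_cons hk
    rw [hdrop]
    simp only [find_sub_expressionsA]
    by_cases htl : pd.drop (k + 1) = []
    · have hk1 : pd.length ≤ k + 1 := List.drop_eq_nil_iff.mp htl
      rw [pvExt_of_opts_empty pd _ _ _ (pvOpts_empty_of_ge pd _ _ hk1)]
      simp [htl, pvOfListSingle]
    · have hne : (pd.drop (k + 1)).isEmpty = false := by
        rw [List.isEmpty_eq_false_iff]; exact htl
      simp only [hne, Bool.false_eq_true, if_false]
      have htlen : (pd.drop (k + 1)).length = pd.length - (k + 1) := List.length_drop
      have ht1 : 1 ≤ (pd.drop (k + 1)).length := List.length_pos_of_ne_nil htl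
      rw [pvLoop (pd.drop (k + 1))
        (PySem.Set.add (PySem.Set.add unav (pd.getD k (0, 0)).1) (pd.getD k (0, 0)).2)
        f (pd.getD k (0, 0)) (by omega)]
      -- abbreviations (proof-local)
      have hnu : PySem.Set.add (PySem.Set.add unav (pd.getD k (0, 0)).1) (pd.getD k (0, 0)).2 =
          pvUsed' pd unav k := rfl
      rw [hnu]
      -- rewrite each branch via the induction hypothesis
      have hGG : ∀ kk ∈ (List.range (pd.drop (k + 1)).length).filter (fun kk =>
            !(PySem.Set.contains (pvUsed' pd unav k) ((pd.drop (k + 1)).getD kk (0, 0)).1)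
              && !(PySem.Set.contains (pvUsed' pd unav k) ((pd.drop (k + 1)).getD kk (0, 0)).2)),
          (find_sub_expressionsA f ((pd.drop (k + 1)).drop kk) (pvUsed' pd unav k)).map
            (fun item => PySem.Set.union (PySem.Set.ofList [pd.getD k (0, 0)]) item) =
          (pvExt pd f (k + 1 + kk + 1) (pvUsed' pd (pvUsed' pd unav k) (k + 1 + kk))).map
            (fun c => pd.getD k (0, 0) :: pd.getD (k + 1 + kk) (0, 0) :: c) := by
        intro kk hkkm
        obtain ⟨hkr, hcn⟩ := List.mem_filter.mp hkkm
        have hkk : kk < (pd.drop (k + 1)).length := List.mem_range.mp hkr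
        have hdd : (pd.drop (k + 1)).drop kk = pd.drop (k + 1 + kk) := by
          rw [List.drop_drop]
        rw [hdd, ih (k + 1 + kk) (pvUsed' pd unav k) (by omega) (by omega), List.map_map]
        refine List.map_congr_left (fun c hc => ?_)
        obtain ⟨hcnd, hcco⟩ := pvExt_mem pd f _ _ c hc
        -- facts about the option pair
        rw [pvGetD_drop] at hcn
        obtain ⟨hoa, hob⟩ : (pd.getD (k + 1 + kk) (0, 0)).1 ∉ pvUsed' pd unav k ∧
            (pd.getD (k + 1 + kk) (0, 0)).2 ∉ pvUsed' pd unav k := by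
          rw [Bool.and_eq_true, Bool.not_eq_true', Bool.not_eq_true'] at hcn
          exact ⟨pvContains_false.mp hcn.1, pvContains_false.mp hcn.2⟩
        have hhead1 : (pd.getD k (0, 0)).1 ∈ pvUsed' pd unav k := pvHeadMemNu _ _ _
        have hj1 : (pd.getD (k + 1 + kk) (0, 0)).1 ∈ pvUsed' pd (pvUsed' pd unav k) (k + 1 + kk) :=
          pvHeadMemNu _ _ _
        have hnd : (pd.getD (k + 1 + kk) (0, 0) :: c).Nodup := by
          refine List.nodup_cons.mpr ⟨fun hmem => ?_, hcnd⟩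
          exact (hcco _ hmem).1 hj1
        have hdisj : ∀ x ∈ pd.getD (k + 1 + kk) (0, 0) :: c, x ∉ [pd.getD k (0, 0)] := by
          intro x hx
          rcases List.mem_cons.mp hx with rfl | hx'
          · simp only [List.mem_singleton]
            intro heq
            exact hoa (heq ▸ hhead1)
          · simp only [List.mem_singleton]
            intro heq
            have h1 := (hcco x hx').1
            rw [mem_pvUsed'] at h1
            exact h1 (Or.inl (heq ▸ hhead1))
        show PySem.Set.union (PySem.Set.ofList [pd.getD k (0, 0)])
            (pd.getD (k + 1 + kk) (0, 0) :: c) = _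
        rw [pvOfListSingle]
        calc PySem.Set.union [pd.getD k (0, 0)] (pd.getD (k + 1 + kk) (0, 0) :: c)
            = [pd.getD k (0, 0)] ++ (pd.getD (k + 1 + kk) (0, 0) :: c) :=
              PySem.Set.update_eq_append_of_disjoint _ _ hnd hdisj
          _ = _ := rfl
      -- relate the option index lists
      have hopt : pvOpts pd (k + 1) (pvUsed' pd unav k) =
          ((List.range (pd.drop (k + 1)).length).filter (fun kk =>
            !(PySem.Set.contains (pvUsed' pd unav k) ((pd.drop (k + 1)).getD kk (0, 0)).1)
              && !(PySem.Set.contains (pvUsed' pd unav k) ((pd.drop (k + 1)).getD kk (0, 0)).2))).map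
            (fun kk => k + 1 + kk) := by
        unfold pvOpts
        rw [show pd.length - (k + 1) = (pd.drop (k + 1)).length from htlen.symm]
        rw [List.range'_eq_map_range, List.filter_map]
        refine congrArg _ (List.filter_congr (fun kk _ => ?_))
        simp only [Function.comp]
        unfold pvOk
        rw [pvGetD_drop]
      by_cases hfe : (List.range (pd.drop (k + 1)).length).filter (fun kk =>
            !(PySem.Set.contains (pvUsed' pd unav k) ((pd.drop (k + 1)).getD kk (0, 0)).1)
              && !(PySem.Set.contains (pvUsed' pd unav k) ((pd.drop (k + 1)).getD kk (0, 0)).2)) = []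
      · rw [hfe]
        rw [pvExt_of_opts_empty pd _ _ _ (by rw [hopt, hfe]; rfl)]
        simp [pvOfListSingle]
      · have hflat : ((List.range (pd.drop (k + 1)).length).filter (fun kk =>
              !(PySem.Set.contains (pvUsed' pd unav k) ((pd.drop (k + 1)).getD kk (0, 0)).1)
                && !(PySem.Set.contains (pvUsed' pd unav k) ((pd.drop (k + 1)).getD kk (0, 0)).2))).flatMap
            (fun kk => (find_sub_expressionsA f ((pd.drop (k + 1)).drop kk) (pvUsed' pd unav k)).map
              (fun item => PySem.Set.union (PySem.Set.ofList [pd.getD k (0, 0)]) item)) ≠ [] := by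
          obtain ⟨kk, hkkm⟩ := List.exists_mem_of_ne_nil _ hfe
          have hgne : (find_sub_expressionsA f ((pd.drop (k + 1)).drop kk) (pvUsed' pd unav k)).map
              (fun item => PySem.Set.union (PySem.Set.ofList [pd.getD k (0, 0)]) item) ≠ [] := by
            rw [hGG kk hkkm]
            simp only [ne_eq, List.map_eq_nil_iff]
            exact pvExt_ne_nil pd f _ _
          obtain ⟨x, hx⟩ := List.exists_mem_of_ne_nil _ hgne
          exact List.ne_nil_of_mem (List.mem_flatMap.mpr ⟨kk, hkkm, hx⟩)
        rw [if_neg (by simpa [List.isEmpty_iff] using hflat)]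
        have hexte : pvExt pd (f + 1) (k + 1) (pvUsed' pd unav k) =
            (pvOpts pd (k + 1) (pvUsed' pd unav k)).flatMap (fun j =>
              (pvExt pd f (j + 1) (pvUsed' pd (pvUsed' pd unav k) j)).map
                (fun c => pd.getD j (0, 0) :: c)) := by
          simp only [pvExt]
          rw [if_neg (by simp only [List.isEmpty_iff]; rw [hopt]; simpa using hfe)]
        rw [hexte, List.map_flatMap, hopt, List.flatMap_map]
        refine List.flatMap_congr (fun kk hkkm => ?_)
        rw [hGG kk hkkm, List.map_map]
        rfl

lemma pvIssubset_ofList (ne e : List (Int × Int)) (hne : ne.Nodup) :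
    PySem.Set.issubset (PySem.Set.ofList ne) (PySem.Set.ofList e) = PySem.Set.issubset ne e := by
  rw [PySem.Set.ofList_eq_self_of_nodup ne hne, Bool.eq_iff_iff,
    PySem.Set.issubset_iff, PySem.Set.issubset_iff]
  simp [PySem.Set.mem_ofList]

lemma pvEmit_eq (exprs : List (List (Int × Int))) (ne : List (Int × Int)) (hne : ne.Nodup) :
    pvEmitA exprs ne = pvEmitB exprs ne := by
  unfold pvEmitA pvEmitB
  rw [show (exprs.any fun expression =>
      PySem.Set.issubset (PySem.Set.ofList ne) (PySem.Set.ofList expression)) =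
      exprs.any fun expression => PySem.Set.issubset ne expression from
    List.any_congr rfl (fun e => pvIssubset_ofList ne e hne)]
  cases hx : exprs.any (fun expression => PySem.Set.issubset ne expression) <;> simp

lemma pvFold_AB (L : List (List (Int × Int))) (exprs : List (List (Int × Int)))
    (hL : ∀ c ∈ L, c.Nodup) :
    L.foldl pvEmitA exprs = L.foldl pvEmitB exprs := by
  induction L generalizing exprs with
  | nil => rfl
  | cons c L ihl =>
    rw [List.foldl_cons, List.foldl_cons, pvEmit_eq exprs c (hL c (by simp))]
    exact ihl _ (fun d hd => hL d (List.mem_cons_of_mem _ hd))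

lemma pvStep_eq (pd : List (Int × Int)) (i : Nat) (hi : i < pd.length)
    (exprs : List (List (Int × Int))) :
    (find_sub_expressionsA pd.length (PySem.List.slice pd (some (i : Int)) none) PySem.Set.empty).foldl
      (fun difference_expressions new_expression =>
        if !(difference_expressions.any (fun expression =>
              PySem.Set.issubset (PySem.Set.ofList new_expression) (PySem.Set.ofList expression))) then
          difference_expressions ++ [new_expression]
        else difference_expressions) exprs =
    pvRunB pd pd.length (2 ^ pd.length) exprs
      [(i + 1, PySem.Set.ofList [pd.getD i (0, 0)],
        PySem.Set.ofList [(pd.getD i (0, 0)).1, (pd.getD i (0, 0)).2])] := by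
  have hslice : PySem.List.slice pd (some (i : Int)) none = pd.drop i := by
    rw [PySem.List.slice_from pd (by simp)]
    simp
  rw [hslice, pvSubA_eq pd pd.length i PySem.Set.empty hi (by omega)]
  have hch : PySem.Set.ofList [pd.getD i (0, 0)] = [pd.getD i (0, 0)] := pvOfListSingle _
  have hused : PySem.Set.ofList [(pd.getD i (0, 0)).1, (pd.getD i (0, 0)).2] =
      pvUsed' pd PySem.Set.empty i := rfl
  rw [hch, hused]
  have hinv1 : ∀ fr ∈ [((i + 1 : Nat), ([pd.getD i (0, 0)] : PySem.Set (Int × Int)),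
      pvUsed' pd PySem.Set.empty i)], pvInv fr := by
    intro fr hfr
    rw [List.mem_singleton] at hfr
    subst hfr
    intro p hp
    rw [List.mem_singleton] at hp
    subst hp
    exact ⟨mem_pvUsed'.mpr (Or.inr (Or.inl rfl)), mem_pvUsed'.mpr (Or.inr (Or.inr rfl))⟩
  have hcost : ([((i + 1 : Nat), ([pd.getD i (0, 0)] : PySem.Set (Int × Int)),
      pvUsed' pd PySem.Set.empty i)].map (fun fr : Nat × PySem.Set (Int × Int) × PySem.Set Int =>
        pvCost pd pd.length fr.1 fr.2.2)).sum ≤ 2 ^ pd.length := by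
    rw [List.map_cons, List.map_nil, List.sum_cons, List.sum_nil]
    have hfix : pvCost pd pd.length ((i + 1 : Nat), ([pd.getD i (0, 0)] : PySem.Set (Int × Int)),
        pvUsed' pd PySem.Set.empty i).1 ((i + 1 : Nat), ([pd.getD i (0, 0)] : PySem.Set (Int × Int)),
        pvUsed' pd PySem.Set.empty i).2.2 =
        pvCost pd pd.length (i + 1) (pvUsed' pd PySem.Set.empty i) := rfl
    rw [hfix]
    have h1 := pvCost_le pd pd.length (i + 1) (pvUsed' pd PySem.Set.empty i) (by omega)
    have h2 : 2 ^ (pd.length - (i + 1)) ≤ 2 ^ pd.length :=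
      Nat.pow_le_pow_right (by norm_num) (by omega)
    omega
  rw [pvRunB_eq pd (2 ^ pd.length) _ exprs hinv1 hcost]
  rw [List.flatMap_cons, List.flatMap_nil, List.append_nil]
  have hlv : pvLeaves pd ((i + 1 : Nat), ([pd.getD i (0, 0)] : PySem.Set (Int × Int)),
      pvUsed' pd PySem.Set.empty i) =
      (pvExt pd pd.length (i + 1) (pvUsed' pd PySem.Set.empty i)).map
        (fun c => pd.getD i (0, 0) :: c) := rfl
  rw [hlv]
  have hfa : (fun (difference_expressions : List (List (Int × Int))) new_expression =>
      if !(difference_expressions.any (fun expression =>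
            PySem.Set.issubset (PySem.Set.ofList new_expression) (PySem.Set.ofList expression))) then
        difference_expressions ++ [new_expression]
      else difference_expressions) = pvEmitA := rfl
  rw [hfa]
  refine pvFold_AB _ exprs (fun c hc => ?_)
  obtain ⟨c', hc', rfl⟩ := List.mem_map.mp hc
  obtain ⟨hcnd, hcco⟩ := pvExt_mem pd pd.length _ _ c' hc'
  refine List.nodup_cons.mpr ⟨fun hmem => ?_, hcnd⟩
  exact (hcco _ hmem).1 (pvHeadMemNu _ _ _)

-- ===== VERDICT (by name: the statement is the Claim_ definition above) =====
theorem find_all_difference_expressions_spec : Claim_equal_find_all_difference_expressions := by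
  intro pd _hdom
  show find_all_difference_expressions pd = find_all_difference_expressions_alt pd
  unfold find_all_difference_expressions find_all_difference_expressions_alt
  rw [PySem.List.pyRange_zero_natCast, List.foldl_map]
  exact PySem.List.foldl_congr_mem _ _ _ _
    (fun acc x hx => pvStep_eq pd x (List.mem_range.mp hx) acc)
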